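-- pv_equiv track=rewrite | github.com/TinyDragons101/SokobanSolver | src/algorithms/utils.py | is_failed
-- ===== SOURCE A (Python) =====
-- def is_failed(stone, pos_of_stones, pos_of_switches, pos_of_walls):
--     """Observe if the current game state is potentially failed, then prune the search"""
--     pos_of_stones = tuple(stone[0:2] for stone in pos_of_stones)
--
--     all_patterns = \
--     [
--         [0,1,2,3,4,5,6,7,8],
--         [2,5,8,1,4,7,0,3,6],
--         [0,1,2,3,4,5,6,7,8][::-1],
--         [2,5,8,1,4,7,0,3,6][::-1],
--         [2,1,0,5,4,3,8,7,6],
--         [0,3,6,1,4,7,2,5,8],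
--         [2,1,0,5,4,3,8,7,6][::-1],
--         [0,3,6,1,4,7,2,5,8][::-1]
--     ]
--
--     if stone not in pos_of_switches:
--         board = \
--         [
--             (stone[0] - 1, stone[1] - 1), (stone[0] - 1, stone[1]), (stone[0] - 1, stone[1] + 1),
--             (stone[0], stone[1] - 1), (stone[0], stone[1]), (stone[0], stone[1] + 1),
--             (stone[0] + 1, stone[1] - 1), (stone[0] + 1, stone[1]), (stone[0] + 1, stone[1] + 1)
--         ]
--         for pattern in all_patterns:
--             new_board = [board[i] for i in pattern]
--             if new_board[1] in pos_of_walls and new_board[5] in pos_of_walls: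
--                 return True
--             elif new_board[1] in pos_of_stones and new_board[2] in pos_of_walls and new_board[5] in pos_of_walls:
--                 return True
--             elif new_board[1] in pos_of_stones and new_board[2] in pos_of_walls and new_board[5] in pos_of_stones:
--                 return True
--             elif new_board[1] in pos_of_stones and new_board[2] in pos_of_stones and new_board[5] in pos_of_stones:
--                 return True
--             elif new_board[1] in pos_of_stones and new_board[2] in pos_of_walls and new_board[3] in pos_of_walls and new_board[8] in pos_of_walls:
--                 return True
--
--     return False
-- ===== SOURCE B (Python) =====
-- # Deadlock patterns as data: each entry (walls, stones) lists the neighbor cells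
-- # (0..7, row-major around the stone, center excluded: 0=UL 1=U 2=UR 3=L 4=R 5=DL 6=D 7=DR)
-- # that must be walls / hold stones.  This is the minimal monotone normal form
-- # (subsumption-free antichain) of the 8-symmetry x 5-rule test of the original.
-- PATTERNS = [
--     ([1, 3], []),
--     ([1, 4], []),
--     ([3, 6], []),
--     ([4, 6], []),
--     ([], [0, 1, 3]),
--     ([], [1, 2, 4]),
--     ([], [3, 5, 6]),
--     ([], [4, 6, 7]),
--     ([0], [1, 3]),
--     ([0, 1], [3]),
--     ([0, 3], [1]),
--     ([1, 2], [4]),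
--     ([2], [1, 4]),
--     ([2, 4], [1]),
--     ([3, 5], [6]),
--     ([4, 7], [6]),
--     ([5], [3, 6]),
--     ([5, 6], [3]),
--     ([6, 7], [4]),
--     ([7], [4, 6]),
--     ([0, 2, 6], [3]),
--     ([0, 2, 6], [4]),
--     ([0, 4, 5], [1]),
--     ([0, 4, 5], [6]),
--     ([1, 5, 7], [3]),
--     ([1, 5, 7], [4]),
--     ([2, 3, 7], [1]),
--     ([2, 3, 7], [6]),
-- ]
--
--
-- def is_failed(stone, pos_of_stones, pos_of_switches, pos_of_walls):
--     """Observe if the current game state is potentially failed, then prune the search"""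
--     pos_of_stones = tuple(s[0:2] for s in pos_of_stones)
--
--     if stone in pos_of_switches:
--         return False
--
--     x, y = stone[0], stone[1]
--     cells = [(x + dx, y + dy) for dx in (-1, 0, 1) for dy in (-1, 0, 1) if dx or dy]
--     w = [c in pos_of_walls for c in cells]
--     s = [c in pos_of_stones for c in cells]
--     return any(all(w[j] for j in pw) and all(s[j] for j in ps) for pw, ps in PATTERNS)
-- ===== Notes on version B (the rewrite author's own statement) =====
-- stated objective: alternative
-- what changed: B drops A's loop over 8 board symmetries with 5 rule checks each and instead subset-matches the stone's 8-cell neighborhood (wall/stone booleans computed once) against a literal table of 28 minimal deadlock patterns - the subsumption-free monotone normal form of A's 40 symmetry-instantiated conditions.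
import Mathlib
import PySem

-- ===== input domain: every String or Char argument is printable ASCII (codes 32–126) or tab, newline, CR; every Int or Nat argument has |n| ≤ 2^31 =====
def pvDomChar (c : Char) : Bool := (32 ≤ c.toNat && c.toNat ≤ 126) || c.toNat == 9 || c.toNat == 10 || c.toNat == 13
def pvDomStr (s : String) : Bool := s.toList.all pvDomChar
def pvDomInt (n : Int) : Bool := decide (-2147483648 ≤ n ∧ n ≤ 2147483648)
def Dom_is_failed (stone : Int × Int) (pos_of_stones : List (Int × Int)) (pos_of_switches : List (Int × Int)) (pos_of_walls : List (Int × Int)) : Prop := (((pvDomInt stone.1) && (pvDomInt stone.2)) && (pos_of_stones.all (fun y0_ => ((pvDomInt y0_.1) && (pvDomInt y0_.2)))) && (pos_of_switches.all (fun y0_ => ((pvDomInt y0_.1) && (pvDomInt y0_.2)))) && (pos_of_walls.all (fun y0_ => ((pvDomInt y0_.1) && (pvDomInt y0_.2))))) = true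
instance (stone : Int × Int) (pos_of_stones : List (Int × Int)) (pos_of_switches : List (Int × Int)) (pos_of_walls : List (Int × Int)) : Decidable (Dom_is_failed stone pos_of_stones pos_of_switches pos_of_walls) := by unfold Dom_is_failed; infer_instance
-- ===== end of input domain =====

-- B replaces A's loop over 8 board symmetries with 5 rules each by subset-matching
-- the neighborhood against a literal table of 28 minimal deadlock patterns
-- (the subsumption-free monotone normal form of A's test); objective: alternative.

-- ===== PORT A =====
-- the loop over all_patterns with early return
def checkPatternsA (board : List (Int × Int)) (stones walls : List (Int × Int)) :
    List (List Nat) → Bool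
  | [] => false
  | p :: rest =>
    let nb := p.map (fun i => board.getD i (0, 0))
    if walls.contains (nb.getD 1 (0,0)) && walls.contains (nb.getD 5 (0,0)) then true
    else if stones.contains (nb.getD 1 (0,0)) && walls.contains (nb.getD 2 (0,0)) && walls.contains (nb.getD 5 (0,0)) then true
    else if stones.contains (nb.getD 1 (0,0)) && walls.contains (nb.getD 2 (0,0)) && stones.contains (nb.getD 5 (0,0)) then true
    else if stones.contains (nb.getD 1 (0,0)) && stones.contains (nb.getD 2 (0,0)) && stones.contains (nb.getD 5 (0,0)) then true
    else if stones.contains (nb.getD 1 (0,0)) && walls.contains (nb.getD 2 (0,0)) && walls.contains (nb.getD 3 (0,0)) && walls.contains (nb.getD 8 (0,0)) then true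
    else checkPatternsA board stones walls rest

def is_failed (stone : Int × Int) (pos_of_stones : List (Int × Int)) (pos_of_switches : List (Int × Int)) (pos_of_walls : List (Int × Int)) : Bool :=
  -- tuple(s[0:2] for s in pos_of_stones): slicing a pair to its first two
  -- components is the identity here
  let pos_of_stones := pos_of_stones.map (fun s => s)
  let all_patterns : List (List Nat) :=
    [ [0,1,2,3,4,5,6,7,8],
      [2,5,8,1,4,7,0,3,6],
      [0,1,2,3,4,5,6,7,8].reverse,
      [2,5,8,1,4,7,0,3,6].reverse,
      [2,1,0,5,4,3,8,7,6],
      [0,3,6,1,4,7,2,5,8],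
      [2,1,0,5,4,3,8,7,6].reverse,
      [0,3,6,1,4,7,2,5,8].reverse ]
  if !(pos_of_switches.contains stone) then
    let board : List (Int × Int) :=
      [ (stone.1 - 1, stone.2 - 1), (stone.1 - 1, stone.2), (stone.1 - 1, stone.2 + 1),
        (stone.1, stone.2 - 1), (stone.1, stone.2), (stone.1, stone.2 + 1),
        (stone.1 + 1, stone.2 - 1), (stone.1 + 1, stone.2), (stone.1 + 1, stone.2 + 1) ]
    checkPatternsA board pos_of_stones pos_of_walls all_patterns
  else false

-- ===== PORT B =====
-- any(all(w[j] for j in pw) and all(s[j] for j in ps) for pw, ps in PATTERNS)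
def matchPatternsB (w s : List Bool) : List (List Nat × List Nat) → Bool
  | [] => false
  | (pw, ps) :: rest =>
    (pw.all (fun j => w.getD j false) && ps.all (fun j => s.getD j false))
      || matchPatternsB w s rest

-- the literal 28-pattern table from Source B (neighbor cells 0..7, row-major, center excluded)
def patternsB : List (List Nat × List Nat) :=
  [ ([1, 3], []),
    ([1, 4], []),
    ([3, 6], []),
    ([4, 6], []),
    ([], [0, 1, 3]),
    ([], [1, 2, 4]),
    ([], [3, 5, 6]),
    ([], [4, 6, 7]),
    ([0], [1, 3]),
    ([0, 1], [3]),
    ([0, 3], [1]),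
    ([1, 2], [4]),
    ([2], [1, 4]),
    ([2, 4], [1]),
    ([3, 5], [6]),
    ([4, 7], [6]),
    ([5], [3, 6]),
    ([5, 6], [3]),
    ([6, 7], [4]),
    ([7], [4, 6]),
    ([0, 2, 6], [3]),
    ([0, 2, 6], [4]),
    ([0, 4, 5], [1]),
    ([0, 4, 5], [6]),
    ([1, 5, 7], [3]),
    ([1, 5, 7], [4]),
    ([2, 3, 7], [1]),
    ([2, 3, 7], [6]) ]

def is_failed_alt (stone : Int × Int) (pos_of_stones : List (Int × Int)) (pos_of_switches : List (Int × Int)) (pos_of_walls : List (Int × Int)) : Bool :=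
  let pos_of_stones := pos_of_stones.map (fun s => s)
  if pos_of_switches.contains stone then false
  else
    let x := stone.1
    let y := stone.2
    let cells : List (Int × Int) :=
      ([-1, 0, 1] : List Int).flatMap (fun dx =>
        (([-1, 0, 1] : List Int).filter (fun dy => !(dx == 0 && dy == 0))).map
          (fun dy => (x + dx, y + dy)))
    let w := cells.map (fun c => pos_of_walls.contains c)
    let s := cells.map (fun c => pos_of_stones.contains c)
    matchPatternsB w s patternsB

-- ===== PRECONDITION & SPEC =====
def Spec_is_failed (stone : Int × Int) (pos_of_stones : List (Int × Int)) (pos_of_switches : List (Int × Int)) (pos_of_walls : List (Int × Int)) (out : Bool) : Prop := out = is_failed_alt stone pos_of_stones pos_of_switches pos_of_walls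
instance (stone : Int × Int) (pos_of_stones : List (Int × Int)) (pos_of_switches : List (Int × Int)) (pos_of_walls : List (Int × Int)) (out : Bool) : Decidable (Spec_is_failed stone pos_of_stones pos_of_switches pos_of_walls out) := by unfold Spec_is_failed; infer_instance

-- ===== CLAIM (what is proved, stated in full; the proofs are below) =====
def Claim_equal_is_failed : Prop := ∀ (stone : Int × Int) (pos_of_stones : List (Int × Int)) (pos_of_switches : List (Int × Int)) (pos_of_walls : List (Int × Int)), Dom_is_failed stone pos_of_stones pos_of_switches pos_of_walls → Spec_is_failed stone pos_of_stones pos_of_switches pos_of_walls (is_failed stone pos_of_stones pos_of_switches pos_of_walls)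

-- ===== LEMMAS AND PROOFS =====
-- A's if-chain with the 16 neighbor-membership tests abstracted as Bool variables
def chainA (w0 w1 w2 w3 w5 w6 w7 w8 s0 s1 s2 s3 s5 s6 s7 s8 : Bool) : Bool :=
  if w1 && w5 then true
  else if s1 && w2 && w5 then true
  else if s1 && w2 && s5 then true
  else if s1 && s2 && s5 then true
  else if s1 && w2 && w3 && w8 then true
  else if w5 && w7 then true
  else if s5 && w8 && w7 then true
  else if s5 && w8 && s7 then true
  else if s5 && s8 && s7 then true
  else if s5 && w8 && w1 && w6 then true
  else if w7 && w3 then true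
  else if s7 && w6 && w3 then true
  else if s7 && w6 && s3 then true
  else if s7 && s6 && s3 then true
  else if s7 && w6 && w5 && w0 then true
  else if w3 && w1 then true
  else if s3 && w0 && w1 then true
  else if s3 && w0 && s1 then true
  else if s3 && s0 && s1 then true
  else if s3 && w0 && w7 && w2 then true
  else if w1 && w3 then true
  else if s1 && w0 && w3 then true
  else if s1 && w0 && s3 then true
  else if s1 && s0 && s3 then true
  else if s1 && w0 && w5 && w6 then true
  else if w3 && w7 then true
  else if s3 && w6 && w7 then true
  else if s3 && w6 && s7 then true
  else if s3 && s6 && s7 then true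
  else if s3 && w6 && w1 && w8 then true
  else if w7 && w5 then true
  else if s7 && w8 && w5 then true
  else if s7 && w8 && s5 then true
  else if s7 && s8 && s5 then true
  else if s7 && w8 && w3 && w2 then true
  else if w5 && w1 then true
  else if s5 && w2 && w1 then true
  else if s5 && w2 && s1 then true
  else if s5 && s2 && s1 then true
  else if s5 && w2 && w7 && w0 then true
  else false

theorem chain_eq (w0 w1 w2 w3 w5 w6 w7 w8 s0 s1 s2 s3 s5 s6 s7 s8 : Bool) :
    chainA w0 w1 w2 w3 w5 w6 w7 w8 s0 s1 s2 s3 s5 s6 s7 s8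
      = matchPatternsB [w0, w1, w2, w3, w5, w6, w7, w8]
          [s0, s1, s2, s3, s5, s6, s7, s8] patternsB := by
  simp only [chainA, matchPatternsB, patternsB, Bool.if_true_left,
    List.all_cons, List.all_nil, List.getD_cons_zero, List.getD_cons_succ,
    Bool.and_true, Bool.true_and, Bool.or_false]
  rw [Bool.eq_iff_iff]
  simp only [Bool.or_eq_true, Bool.and_eq_true, decide_eq_true_eq]
  constructor
  · rintro (⟨h0, h1⟩ | ⟨⟨h0, h1⟩, h2⟩ | ⟨⟨h0, h1⟩, h2⟩ | ⟨⟨h0, h1⟩, h2⟩ | ⟨⟨⟨h0, h1⟩, h2⟩, h3⟩ | ⟨h0, h1⟩ | ⟨⟨h0, h1⟩, h2⟩ | ⟨⟨h0, h1⟩, h2⟩ | ⟨⟨h0, h1⟩, h2⟩ | ⟨⟨⟨h0, h1⟩, h2⟩, h3⟩ | ⟨h0, h1⟩ | ⟨⟨h0, h1⟩, h2⟩ | ⟨⟨h0, h1⟩, h2⟩ | ⟨⟨h0, h1⟩, h2⟩ | ⟨⟨⟨h0, h1⟩, h2⟩, h3⟩ | ⟨h0, h1⟩ | ⟨⟨h0,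 h1⟩, h2⟩ | ⟨⟨h0, h1⟩, h2⟩ | ⟨⟨h0, h1⟩, h2⟩ | ⟨⟨⟨h0, h1⟩, h2⟩, h3⟩ | ⟨h0, h1⟩ | ⟨⟨h0, h1⟩, h2⟩ | ⟨⟨h0, h1⟩, h2⟩ | ⟨⟨h0, h1⟩, h2⟩ | ⟨⟨⟨h0, h1⟩, h2⟩, h3⟩ | ⟨h0, h1⟩ | ⟨⟨h0, h1⟩, h2⟩ | ⟨⟨h0, h1⟩, h2⟩ | ⟨⟨h0, h1⟩, h2⟩ | ⟨⟨⟨h0, h1⟩, h2⟩, h3⟩ | ⟨h0, h1⟩ | ⟨⟨h0, h1⟩, h2⟩ | ⟨⟨h0, h1⟩, h2⟩ | ⟨⟨h0, h1⟩, h2⟩ | ⟨⟨⟨h0, h1⟩, h2⟩, h3⟩ | ⟨h0, h1⟩ | ⟨⟨h0, h1⟩, h2⟩ | ⟨⟨h0, h1⟩, h2⟩ | ⟨⟨h0, h1⟩, h2⟩ | ⟨⟨⟨h0, h1⟩, h2⟩, h3⟩)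
    · exact Or.inr (Or.inl (⟨h0, h1⟩))
    · exact Or.inr (Or.inr (Or.inr (Or.inr (Or.inr (Or.inr (Or.inr (Or.inr (Or.inr (Or.inr (Or.inr (Or.inr (Or.inr (Or.inl (⟨⟨h1, h2⟩, h0⟩))))))))))))))
    · exact Or.inr (Or.inr (Or.inr (Or.inr (Or.inr (Or.inr (Or.inr (Or.inr (Or.inr (Or.inr (Or.inr (Or.inr (Or.inl (⟨h1, h0, h2⟩)))))))))))))
    · exact Or.inr (Or.inr (Or.inr (Or.inr (Or.inr (Or.inl (⟨h0, h1, h2⟩))))))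
    · exact Or.inr (Or.inr (Or.inr (Or.inr (Or.inr (Or.inr (Or.inr (Or.inr (Or.inr (Or.inr (Or.inr (Or.inr (Or.inr (Or.inr (Or.inr (Or.inr (Or.inr (Or.inr (Or.inr (Or.inr (Or.inr (Or.inr (Or.inr (Or.inr (Or.inr (Or.inr (Or.inl (⟨⟨h1, h2, h3⟩, h0⟩)))))))))))))))))))))))))))
    · exact Or.inr (Or.inr (Or.inr (Or.inl (⟨h0, h1⟩))))
    · exact Or.inr (Or.inr (Or.inr (Or.inr (Or.inr (Or.inr (Or.inr (Or.inr (Or.inr (Or.inr (Or.inr (Or.inr (Or.inr (Or.inr (Or.inr (Or.inr (Or.inr (Or.inr (Or.inl (⟨⟨h2, h1⟩, h0⟩)))))))))))))))))))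
    · exact Or.inr (Or.inr (Or.inr (Or.inr (Or.inr (Or.inr (Or.inr (Or.inr (Or.inr (Or.inr (Or.inr (Or.inr (Or.inr (Or.inr (Or.inr (Or.inr (Or.inr (Or.inr (Or.inr (Or.inl (⟨h1, h0, h2⟩))))))))))))))))))))
    · exact Or.inr (Or.inr (Or.inr (Or.inr (Or.inr (Or.inr (Or.inr (Or.inl (⟨h0, h2, h1⟩))))))))
    · exact Or.inr (Or.inr (Or.inr (Or.inr (Or.inr (Or.inr (Or.inr (Or.inr (Or.inr (Or.inr (Or.inr (Or.inr (Or.inr (Or.inr (Or.inr (Or.inr (Or.inr (Or.inr (Or.inr (Or.inr (Or.inr (Or.inr (Or.inr (Or.inr (Or.inr (Or.inl (⟨⟨h2, h3, h1⟩, h0⟩))))))))))))))))))))))))))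
    · exact Or.inr (Or.inr (Or.inl (⟨h1, h0⟩)))
    · exact Or.inr (Or.inr (Or.inr (Or.inr (Or.inr (Or.inr (Or.inr (Or.inr (Or.inr (Or.inr (Or.inr (Or.inr (Or.inr (Or.inr (Or.inl (⟨⟨h2, h1⟩, h0⟩)))))))))))))))
    · exact Or.inr (Or.inr (Or.inr (Or.inr (Or.inr (Or.inr (Or.inr (Or.inr (Or.inr (Or.inr (Or.inr (Or.inr (Or.inr (Or.inr (Or.inr (Or.inr (Or.inl (⟨h1, h2, h0⟩)))))))))))))))))
    · exact Or.inr (Or.inr (Or.inr (Or.inr (Or.inr (Or.inr (Or.inl (⟨h2, h1, h0⟩)))))))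
    · exact Or.inr (Or.inr (Or.inr (Or.inr (Or.inr (Or.inr (Or.inr (Or.inr (Or.inr (Or.inr (Or.inr (Or.inr (Or.inr (Or.inr (Or.inr (Or.inr (Or.inr (Or.inr (Or.inr (Or.inr (Or.inr (Or.inr (Or.inr (Or.inl (⟨⟨h3, h2, h1⟩, h0⟩))))))))))))))))))))))))
    · exact Or.inl (⟨h1, h0⟩)
    · exact Or.inr (Or.inr (Or.inr (Or.inr (Or.inr (Or.inr (Or.inr (Or.inr (Or.inr (Or.inl (⟨⟨h1, h2⟩, h0⟩))))))))))
    · exact Or.inr (Or.inr (Or.inr (Or.inr (Or.inr (Or.inr (Or.inr (Or.inr (Or.inl (⟨h1, h2, h0⟩)))))))))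
    · exact Or.inr (Or.inr (Or.inr (Or.inr (Or.inl (⟨h1, h2, h0⟩)))))
    · exact Or.inr (Or.inr (Or.inr (Or.inr (Or.inr (Or.inr (Or.inr (Or.inr (Or.inr (Or.inr (Or.inr (Or.inr (Or.inr (Or.inr (Or.inr (Or.inr (Or.inr (Or.inr (Or.inr (Or.inr (Or.inl (⟨⟨h1, h3, h2⟩, h0⟩)))))))))))))))))))))
    · exact Or.inl (⟨h0, h1⟩)
    · exact Or.inr (Or.inr (Or.inr (Or.inr (Or.inr (Or.inr (Or.inr (Or.inr (Or.inr (Or.inr (Or.inl (⟨⟨h1, h2⟩, h0⟩)))))))))))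
    · exact Or.inr (Or.inr (Or.inr (Or.inr (Or.inr (Or.inr (Or.inr (Or.inr (Or.inl (⟨h1, h0, h2⟩)))))))))
    · exact Or.inr (Or.inr (Or.inr (Or.inr (Or.inl (⟨h1, h0, h2⟩)))))
    · exact Or.inr (Or.inr (Or.inr (Or.inr (Or.inr (Or.inr (Or.inr (Or.inr (Or.inr (Or.inr (Or.inr (Or.inr (Or.inr (Or.inr (Or.inr (Or.inr (Or.inr (Or.inr (Or.inr (Or.inr (Or.inr (Or.inr (Or.inl (⟨⟨h1, h2, h3⟩, h0⟩)))))))))))))))))))))))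
    · exact Or.inr (Or.inr (Or.inl (⟨h0, h1⟩)))
    · exact Or.inr (Or.inr (Or.inr (Or.inr (Or.inr (Or.inr (Or.inr (Or.inr (Or.inr (Or.inr (Or.inr (Or.inr (Or.inr (Or.inr (Or.inr (Or.inr (Or.inr (Or.inl (⟨⟨h1, h2⟩, h0⟩))))))))))))))))))
    · exact Or.inr (Or.inr (Or.inr (Or.inr (Or.inr (Or.inr (Or.inr (Or.inr (Or.inr (Or.inr (Or.inr (Or.inr (Or.inr (Or.inr (Or.inr (Or.inr (Or.inl (⟨h1, h0, h2⟩)))))))))))))))))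
    · exact Or.inr (Or.inr (Or.inr (Or.inr (Or.inr (Or.inr (Or.inl (⟨h0, h1, h2⟩)))))))
    · exact Or.inr (Or.inr (Or.inr (Or.inr (Or.inr (Or.inr (Or.inr (Or.inr (Or.inr (Or.inr (Or.inr (Or.inr (Or.inr (Or.inr (Or.inr (Or.inr (Or.inr (Or.inr (Or.inr (Or.inr (Or.inr (Or.inr (Or.inr (Or.inr (Or.inl (⟨⟨h2, h1, h3⟩, h0⟩)))))))))))))))))))))))))
    · exact Or.inr (Or.inr (Or.inr (Or.inl (⟨h1, h0⟩))))
    · exact Or.inr (Or.inr (Or.inr (Or.inr (Or.inr (Or.inr (Or.inr (Or.inr (Or.inr (Or.inr (Or.inr (Or.inr (Or.inr (Or.inr (Or.inr (Or.inl (⟨⟨h2, h1⟩, h0⟩))))))))))))))))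
    · exact Or.inr (Or.inr (Or.inr (Or.inr (Or.inr (Or.inr (Or.inr (Or.inr (Or.inr (Or.inr (Or.inr (Or.inr (Or.inr (Or.inr (Or.inr (Or.inr (Or.inr (Or.inr (Or.inr (Or.inl (⟨h1, h2, h0⟩))))))))))))))))))))
    · exact Or.inr (Or.inr (Or.inr (Or.inr (Or.inr (Or.inr (Or.inr (Or.inl (⟨h2, h0, h1⟩))))))))
    · exact Or.inr (Or.inr (Or.inr (Or.inr (Or.inr (Or.inr (Or.inr (Or.inr (Or.inr (Or.inr (Or.inr (Or.inr (Or.inr (Or.inr (Or.inr (Or.inr (Or.inr (Or.inr (Or.inr (Or.inr (Or.inr (Or.inr (Or.inr (Or.inr (Or.inr (Or.inr (Or.inr (⟨⟨h3, h2, h1⟩, h0⟩)))))))))))))))))))))))))))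
    · exact Or.inr (Or.inl (⟨h1, h0⟩))
    · exact Or.inr (Or.inr (Or.inr (Or.inr (Or.inr (Or.inr (Or.inr (Or.inr (Or.inr (Or.inr (Or.inr (Or.inl (⟨⟨h2, h1⟩, h0⟩))))))))))))
    · exact Or.inr (Or.inr (Or.inr (Or.inr (Or.inr (Or.inr (Or.inr (Or.inr (Or.inr (Or.inr (Or.inr (Or.inr (Or.inl (⟨h1, h2, h0⟩)))))))))))))
    · exact Or.inr (Or.inr (Or.inr (Or.inr (Or.inr (Or.inl (⟨h2, h1, h0⟩))))))
    · exact Or.inr (Or.inr (Or.inr (Or.inr (Or.inr (Or.inr (Or.inr (Or.inr (Or.inr (Or.inr (Or.inr (Or.inr (Or.inr (Or.inr (Or.inr (Or.inr (Or.inr (Or.inr (Or.inr (Or.inr (Or.inr (Or.inl (⟨⟨h3, h1, h2⟩, h0⟩))))))))))))))))))))))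
  · rintro (⟨h0, h1⟩ | ⟨h0, h1⟩ | ⟨h0, h1⟩ | ⟨h0, h1⟩ | ⟨g0, g1, g2⟩ | ⟨g0, g1, g2⟩ | ⟨g0, g1, g2⟩ | ⟨g0, g1, g2⟩ | ⟨h0, g0, g1⟩ | ⟨⟨h0, h1⟩, g0⟩ | ⟨⟨h0, h1⟩, g0⟩ | ⟨⟨h0, h1⟩, g0⟩ | ⟨h0, g0, g1⟩ | ⟨⟨h0, h1⟩, g0⟩ | ⟨⟨h0, h1⟩, g0⟩ | ⟨⟨h0, h1⟩, g0⟩ | ⟨h0, g0, g1⟩ | ⟨⟨h0, h1⟩, g0⟩ | ⟨⟨h0, h1⟩, g0⟩ | ⟨h0, g0, g1⟩ | ⟨⟨h0, h1, h2⟩, g0⟩ | ⟨⟨h0, h1, h2⟩, g0⟩ | ⟨⟨h0, h1, h2⟩, g0⟩ | ⟨⟨h0, h1, h2⟩, g0⟩ | ⟨⟨h0, h1, h2⟩, g0⟩ | ⟨⟨h0, h1, h2⟩, g0⟩ | ⟨⟨h0, h1, h2⟩, g0⟩ | ⟨⟨h0, h1, h2⟩, g0⟩)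
    · exact Or.inr (Or.inr (Or.inr (Or.inr (Or.inr (Or.inr (Or.inr (Or.inr (Or.inr (Or.inr (Or.inr (Or.inr (Or.inr (Or.inr (Or.inr (Or.inl (⟨h1, h0⟩))))))))))))))))
    · exact Or.inl (⟨h0, h1⟩)
    · exact Or.inr (Or.inr (Or.inr (Or.inr (Or.inr (Or.inr (Or.inr (Or.inr (Or.inr (Or.inr (Or.inl (⟨h1, h0⟩)))))))))))
    · exact Or.inr (Or.inr (Or.inr (Or.inr (Or.inr (Or.inl (⟨h0, h1⟩))))))
    · exact Or.inr (Or.inr (Or.inr (Or.inr (Or.inr (Or.inr (Or.inr (Or.inr (Or.inr (Or.inr (Or.inr (Or.inr (Or.inr (Or.inr (Or.inr (Or.inr (Or.inr (Or.inr (Or.inl (⟨⟨g2, g0⟩, g1⟩)))))))))))))))))))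
    · exact Or.inr (Or.inr (Or.inr (Or.inl (⟨⟨g0, g1⟩, g2⟩))))
    · exact Or.inr (Or.inr (Or.inr (Or.inr (Or.inr (Or.inr (Or.inr (Or.inr (Or.inr (Or.inr (Or.inr (Or.inr (Or.inr (Or.inl (⟨⟨g2, g1⟩, g0⟩))))))))))))))
    · exact Or.inr (Or.inr (Or.inr (Or.inr (Or.inr (Or.inr (Or.inr (Or.inr (Or.inl (⟨⟨g0, g2⟩, g1⟩)))))))))
    · exact Or.inr (Or.inr (Or.inr (Or.inr (Or.inr (Or.inr (Or.inr (Or.inr (Or.inr (Or.inr (Or.inr (Or.inr (Or.inr (Or.inr (Or.inr (Or.inr (Or.inr (Or.inl (⟨⟨g1, h0⟩, g0⟩))))))))))))))))))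
    · exact Or.inr (Or.inr (Or.inr (Or.inr (Or.inr (Or.inr (Or.inr (Or.inr (Or.inr (Or.inr (Or.inr (Or.inr (Or.inr (Or.inr (Or.inr (Or.inr (Or.inl (⟨⟨g0, h0⟩, h1⟩)))))))))))))))))
    · exact Or.inr (Or.inr (Or.inr (Or.inr (Or.inr (Or.inr (Or.inr (Or.inr (Or.inr (Or.inr (Or.inr (Or.inr (Or.inr (Or.inr (Or.inr (Or.inr (Or.inr (Or.inr (Or.inr (Or.inr (Or.inr (Or.inl (⟨⟨g0, h0⟩, h1⟩))))))))))))))))))))))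
    · exact Or.inr (Or.inr (Or.inr (Or.inr (Or.inr (Or.inr (Or.inr (Or.inr (Or.inr (Or.inr (Or.inr (Or.inr (Or.inr (Or.inr (Or.inr (Or.inr (Or.inr (Or.inr (Or.inr (Or.inr (Or.inr (Or.inr (Or.inr (Or.inr (Or.inr (Or.inr (Or.inr (Or.inr (Or.inr (Or.inr (Or.inr (Or.inr (Or.inr (Or.inr (Or.inr (Or.inr (Or.inl (⟨⟨g0, h1⟩, h0⟩)))))))))))))))))))))))))))))))))))))
    · exact Or.inr (Or.inr (Or.inl (⟨⟨g0, h0⟩, g1⟩)))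
    · exact Or.inr (Or.inl (⟨⟨g0, h0⟩, h1⟩))
    · exact Or.inr (Or.inr (Or.inr (Or.inr (Or.inr (Or.inr (Or.inr (Or.inr (Or.inr (Or.inr (Or.inr (Or.inl (⟨⟨g0, h1⟩, h0⟩))))))))))))
    · exact Or.inr (Or.inr (Or.inr (Or.inr (Or.inr (Or.inr (Or.inr (Or.inr (Or.inr (Or.inr (Or.inr (Or.inr (Or.inr (Or.inr (Or.inr (Or.inr (Or.inr (Or.inr (Or.inr (Or.inr (Or.inr (Or.inr (Or.inr (Or.inr (Or.inr (Or.inr (Or.inr (Or.inr (Or.inr (Or.inr (Or.inr (Or.inl (⟨⟨g0, h1⟩, h0⟩))))))))))))))))))))))))))))))))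
    · exact Or.inr (Or.inr (Or.inr (Or.inr (Or.inr (Or.inr (Or.inr (Or.inr (Or.inr (Or.inr (Or.inr (Or.inr (Or.inl (⟨⟨g1, h0⟩, g0⟩)))))))))))))
    · exact Or.inr (Or.inr (Or.inr (Or.inr (Or.inr (Or.inr (Or.inr (Or.inr (Or.inr (Or.inr (Or.inr (Or.inr (Or.inr (Or.inr (Or.inr (Or.inr (Or.inr (Or.inr (Or.inr (Or.inr (Or.inr (Or.inr (Or.inr (Or.inr (Or.inr (Or.inr (Or.inl (⟨⟨g0, h0⟩, h1⟩)))))))))))))))))))))))))))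
    · exact Or.inr (Or.inr (Or.inr (Or.inr (Or.inr (Or.inr (Or.inl (⟨⟨g0, h1⟩, h0⟩)))))))
    · exact Or.inr (Or.inr (Or.inr (Or.inr (Or.inr (Or.inr (Or.inr (Or.inl (⟨⟨g0, h0⟩, g1⟩))))))))
    · exact Or.inr (Or.inr (Or.inr (Or.inr (Or.inr (Or.inr (Or.inr (Or.inr (Or.inr (Or.inr (Or.inr (Or.inr (Or.inr (Or.inr (Or.inr (Or.inr (Or.inr (Or.inr (Or.inr (Or.inl (⟨⟨⟨g0, h0⟩, h2⟩, h1⟩))))))))))))))))))))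
    · exact Or.inr (Or.inr (Or.inr (Or.inr (Or.inr (Or.inr (Or.inr (Or.inr (Or.inr (Or.inr (Or.inr (Or.inr (Or.inr (Or.inr (Or.inr (Or.inr (Or.inr (Or.inr (Or.inr (Or.inr (Or.inr (Or.inr (Or.inr (Or.inr (Or.inr (Or.inr (Or.inr (Or.inr (Or.inr (Or.inr (Or.inr (Or.inr (Or.inr (Or.inr (Or.inr (Or.inr (Or.inr (Or.inr (Or.inr (⟨⟨⟨g0, h1⟩, h2⟩, h0⟩)))))))))))))))))))))))))))))))))))))))
    · exact Or.inr (Or.inr (Or.inr (Or.inr (Or.inr (Or.inr (Or.inr (Or.inr (Or.inr (Or.inr (Or.inr (Or.inr (Or.inr (Or.inr (Or.inr (Or.inr (Or.inr (Or.inr (Or.inr (Or.inr (Or.inr (Or.inr (Or.inr (Or.inr (Or.inl (⟨⟨⟨g0, h0⟩, h1⟩, h2⟩)))))))))))))))))))))))))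
    · exact Or.inr (Or.inr (Or.inr (Or.inr (Or.inr (Or.inr (Or.inr (Or.inr (Or.inr (Or.inr (Or.inr (Or.inr (Or.inr (Or.inr (Or.inl (⟨⟨⟨g0, h2⟩, h1⟩, h0⟩)))))))))))))))
    · exact Or.inr (Or.inr (Or.inr (Or.inr (Or.inr (Or.inr (Or.inr (Or.inr (Or.inr (Or.inr (Or.inr (Or.inr (Or.inr (Or.inr (Or.inr (Or.inr (Or.inr (Or.inr (Or.inr (Or.inr (Or.inr (Or.inr (Or.inr (Or.inr (Or.inr (Or.inr (Or.inr (Or.inr (Or.inr (Or.inl (⟨⟨⟨g0, h1⟩, h0⟩, h2⟩))))))))))))))))))))))))))))))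
    · exact Or.inr (Or.inr (Or.inr (Or.inr (Or.inr (Or.inr (Or.inr (Or.inr (Or.inr (Or.inl (⟨⟨⟨g0, h2⟩, h0⟩, h1⟩))))))))))
    · exact Or.inr (Or.inr (Or.inr (Or.inr (Or.inl (⟨⟨⟨g0, h0⟩, h1⟩, h2⟩)))))
    · exact Or.inr (Or.inr (Or.inr (Or.inr (Or.inr (Or.inr (Or.inr (Or.inr (Or.inr (Or.inr (Or.inr (Or.inr (Or.inr (Or.inr (Or.inr (Or.inr (Or.inr (Or.inr (Or.inr (Or.inr (Or.inr (Or.inr (Or.inr (Or.inr (Or.inr (Or.inr (Or.inr (Or.inr (Or.inr (Or.inr (Or.inr (Or.inr (Or.inr (Or.inr (Or.inl (⟨⟨⟨g0, h2⟩, h1⟩, h0⟩)))))))))))))))))))))))))))))))))))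


set_option maxHeartbeats 2000000 in
theorem bridgeA (x y : Int) (pos_of_stones pos_of_switches pos_of_walls : List (Int × Int)) :
    is_failed (x, y) pos_of_stones pos_of_switches pos_of_walls
      = if !(pos_of_switches.contains (x, y)) then
          chainA
        (pos_of_walls.contains (x - 1, y - 1))
        (pos_of_walls.contains (x - 1, y))
        (pos_of_walls.contains (x - 1, y + 1))
        (pos_of_walls.contains (x, y - 1))
        (pos_of_walls.contains (x, y + 1))
        (pos_of_walls.contains (x + 1, y - 1))
        (pos_of_walls.contains (x + 1, y))
        (pos_of_walls.contains (x + 1, y + 1))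
        ((pos_of_stones.map (fun s => s)).contains (x - 1, y - 1))
        ((pos_of_stones.map (fun s => s)).contains (x - 1, y))
        ((pos_of_stones.map (fun s => s)).contains (x - 1, y + 1))
        ((pos_of_stones.map (fun s => s)).contains (x, y - 1))
        ((pos_of_stones.map (fun s => s)).contains (x, y + 1))
        ((pos_of_stones.map (fun s => s)).contains (x + 1, y - 1))
        ((pos_of_stones.map (fun s => s)).contains (x + 1, y))
        ((pos_of_stones.map (fun s => s)).contains (x + 1, y + 1))
        else false := rfl

set_option maxHeartbeats 2000000 in
theorem bridgeB (x y : Int) (pos_of_stones pos_of_switches pos_of_walls : List (Int × Int)) :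
    is_failed_alt (x, y) pos_of_stones pos_of_switches pos_of_walls
      = if pos_of_switches.contains (x, y) then false
        else matchPatternsB
          [(pos_of_walls.contains (x + -1, y + -1)), (pos_of_walls.contains (x + -1, y + 0)), (pos_of_walls.contains (x + -1, y + 1)), (pos_of_walls.contains (x + 0, y + -1)), (pos_of_walls.contains (x + 0, y + 1)), (pos_of_walls.contains (x + 1, y + -1)), (pos_of_walls.contains (x + 1, y + 0)), (pos_of_walls.contains (x + 1, y + 1))]
          [((pos_of_stones.map (fun s => s)).contains (x + -1, y + -1)), ((pos_of_stones.map (fun s => s)).contains (x + -1, y + 0)), ((pos_of_stones.map (fun s => s)).contains (x + -1, y + 1)), ((pos_of_stones.map (fun s => s)).contains (x + 0, y + -1)), ((pos_of_stones.map (fun s => s)).contains (x + 0, y + 1)), ((pos_of_stones.map (fun s => s)).contains (x + 1, y + -1)), ((pos_of_stones.map (fun s => s)).contains (x + 1, y + 0)), ((pos_of_stones.map (fun s => s)).contains (x + 1, y + 1))] patternsB := rfl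

theorem both_eq (stone : Int × Int) (pos_of_stones : List (Int × Int)) (pos_of_switches : List (Int × Int)) (pos_of_walls : List (Int × Int)) :
    is_failed stone pos_of_stones pos_of_switches pos_of_walls
      = is_failed_alt stone pos_of_stones pos_of_switches pos_of_walls := by
  obtain ⟨x, y⟩ := stone
  rw [bridgeA, bridgeB]
  cases hc : pos_of_switches.contains (x, y)
  · simp only [Bool.not_false, if_true, ← sub_eq_add_neg, add_zero]
    exact chain_eq _ _ _ _ _ _ _ _ _ _ _ _ _ _ _ _
  · simp

-- ===== VERDICT (by name: the statement is the Claim_ definition above) =====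
theorem is_failed_spec : Claim_equal_is_failed := by
  intro stone a b c _
  exact both_eq stone a b c
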